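-- pv_equiv track=rewrite | github.com/rzsun/svdream | string/three_longest_substring_no_repeated_char.py | threeLongestSubstrBruteForce
-- ===== SOURCE A (Python) =====
-- def threeLongestSubstrBruteForce(s):
--     substrings = [s[i: j] for i in range(len(s)) for j in range(i + 1, len(s) + 1)]
--     lengths = []
--     for s in substrings:
--         if len(set(s)) == len(s):
--             lengths.append(len(s))
--
--     lengths.sort()
--     lengths.reverse()
--     return lengths[0:3]
-- ===== SOURCE B (Python) =====
-- def threeLongestSubstrBruteForce(s):
--     # For each start i, compute the longest duplicate-free extent with one forward
--     # scan; every shorter prefix is also duplicate-free, so emit the whole range.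
--     n = len(s)
--     lengths = []
--     for i in range(n):
--         e = 0
--         seen = set()
--         while i + e < n and s[i + e] not in seen:
--             seen.add(s[i + e])
--             e += 1
--         lengths.extend(range(e, 0, -1))
--     lengths.sort(reverse=True)
--     return lengths[:3]
-- ===== Notes on version B (the rewrite author's own statement) =====
-- stated objective: faster
-- what changed: B drops A's O(n^2)-substring enumeration with a per-substring set rebuild: for each start it scans once for the longest duplicate-free extent and emits the run of shorter lengths directly (duplicate-freeness is prefix-closed), then one reverse sort.
import Mathlib
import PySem

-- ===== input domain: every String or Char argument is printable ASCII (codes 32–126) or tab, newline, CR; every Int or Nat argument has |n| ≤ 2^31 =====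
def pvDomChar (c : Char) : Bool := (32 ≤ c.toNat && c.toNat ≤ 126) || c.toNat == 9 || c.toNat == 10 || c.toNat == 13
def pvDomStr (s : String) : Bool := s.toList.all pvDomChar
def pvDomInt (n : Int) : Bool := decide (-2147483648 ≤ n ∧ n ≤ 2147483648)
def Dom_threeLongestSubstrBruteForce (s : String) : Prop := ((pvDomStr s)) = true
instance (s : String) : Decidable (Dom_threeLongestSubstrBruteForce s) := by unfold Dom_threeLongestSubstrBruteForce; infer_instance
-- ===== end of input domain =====

-- B replaces A's all-substrings enumeration by a per-start duplicate-free extent scan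
-- (every shorter prefix is then also duplicate-free), then one reverse sort; objective: faster.

-- ===== PORT A =====
def threeLongestSubstrBruteForce (s : String) : List Int :=
  let cs := s.toList
  let n : Int := (cs.length : Int)
  let substrings : List (List Char) :=
    (PySem.List.pyRange 0 n 1).flatMap (fun i =>
      (PySem.List.pyRange (i + 1) (n + 1) 1).map (fun j =>
        PySem.List.slice cs (some i) (some j)))
  let lengths : List Int :=
    substrings.foldl (fun acc t =>
      if (PySem.Set.ofList t).length = t.length then acc ++ [(t.length : Int)] else acc) []
  -- lengths.sort(); lengths.reverse(); return lengths[0:3]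
  PySem.List.slice (PySem.List.sorted lengths (fun x => x) false).reverse (some 0) (some 3)

-- ===== PORT B =====
-- the 'while i + e < n and s[i + e] not in seen: seen.add(s[i+e]); e += 1' loop of B,
-- scanning the suffix of the string that starts at position i
def bExtent : List Char → PySem.Set Char → Nat
  | [], _ => 0
  | c :: r, seen =>
      if PySem.Set.contains seen c then 0 else bExtent r (PySem.Set.add seen c) + 1

def threeLongestSubstrBruteForce_alt (s : String) : List Int :=
  let cs := s.toList
  let n : Int := (cs.length : Int)
  let lengths : List Int :=
    (PySem.List.pyRange 0 n 1).foldl (fun acc i =>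
      acc ++ PySem.List.pyRange ((bExtent (cs.drop i.toNat) PySem.Set.empty : Nat) : Int) 0 (-1)) []
  -- lengths.sort(reverse=True); return lengths[:3]
  PySem.List.slice (PySem.List.sorted lengths (fun x => x) true) none (some 3)

-- ===== PRECONDITION & SPEC =====
def Spec_threeLongestSubstrBruteForce (s : String) (out : List Int) : Prop := out = threeLongestSubstrBruteForce_alt s
instance (s : String) (out : List Int) : Decidable (Spec_threeLongestSubstrBruteForce s out) := by unfold Spec_threeLongestSubstrBruteForce; infer_instance

-- ===== CLAIM (what is proved, stated in full; the proofs are below) =====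
def Claim_equal_threeLongestSubstrBruteForce : Prop := ∀ (s : String), Dom_threeLongestSubstrBruteForce s → Spec_threeLongestSubstrBruteForce s (threeLongestSubstrBruteForce s)

-- ===== LEMMAS AND PROOFS =====

theorem bExtent_le (t : List Char) : ∀ seen, bExtent t seen ≤ t.length := by
  induction t with
  | nil => intro seen; simp [bExtent]
  | cons c r ih =>
      intro seen
      simp only [bExtent, List.length_cons]
      split
      · omega
      · have := ih (PySem.Set.add seen c); omega

theorem bExtent_iff (t : List Char) : ∀ (seen : PySem.Set Char) (L : Nat), L ≤ t.length →
    (((t.take L).Nodup ∧ ∀ c ∈ t.take L, c ∉ seen) ↔ L ≤ bExtent t seen) := by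
  induction t with
  | nil =>
      intro seen L hL
      simp only [List.length_nil, Nat.le_zero] at hL
      subst hL
      simp
  | cons c r ih =>
      intro seen L hL
      match L with
      | 0 => simp
      | Nat.succ L =>
        simp only [List.take_succ_cons, bExtent]
        by_cases hc : PySem.Set.contains seen c
        · rw [if_pos hc]
          have hcm : c ∈ seen := (PySem.Set.contains_iff seen c).mp hc
          constructor
          · rintro ⟨-, hall⟩
            exact absurd hcm (hall c (List.mem_cons_self))
          · omega
        · rw [if_neg hc]
          have hcm : c ∉ seen := fun h => hc ((PySem.Set.contains_iff seen c).mpr h)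
          have hL' : L ≤ r.length := by
            simpa using Nat.le_of_succ_le_succ (by simpa using hL)
          have hiff := ih (PySem.Set.add seen c) L hL'
          constructor
          · rintro ⟨hnd, hall⟩
            have hnd' : (r.take L).Nodup := (List.nodup_cons.mp hnd).2
            have hcnot : c ∉ r.take L := (List.nodup_cons.mp hnd).1
            have : L ≤ bExtent r (PySem.Set.add seen c) := by
              refine hiff.mp ⟨hnd', ?_⟩
              intro x hx hxmem
              rcases (PySem.Set.mem_add seen c x).mp hxmem with hxs | rfl
              · exact hall x (List.mem_cons_of_mem _ hx) hxs
              · exact hcnot hx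
            omega
          · intro hle
            have : L ≤ bExtent r (PySem.Set.add seen c) := by omega
            obtain ⟨hnd, hall⟩ := hiff.mpr this
            refine ⟨List.nodup_cons.mpr ⟨?_, hnd⟩, ?_⟩
            · intro hcx
              exact (hall c hcx) ((PySem.Set.mem_add seen c c).mpr (Or.inr rfl))
            · intro x hx
              rcases List.mem_cons.mp hx with rfl | hx'
              · exact hcm
              · intro hxs
                exact hall x hx' ((PySem.Set.mem_add seen c x).mpr (Or.inl hxs))

theorem ofList_sublist {α : Type} [BEq α] [LawfulBEq α] (t : List α) :
    (PySem.Set.ofList t).Sublist t := by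
  induction t with
  | nil => simp [PySem.Set.ofList_nil]
  | cons x xs ih =>
      rw [PySem.Set.ofList_cons]
      exact List.Sublist.cons₂ x (List.Sublist.trans List.filter_sublist ih)

theorem setLen_iff_nodup (t : List Char) : ((PySem.Set.ofList t).length = t.length) ↔ t.Nodup := by
  constructor
  · intro h
    have heq := (ofList_sublist t).eq_of_length h
    rw [← heq]
    exact PySem.Set.nodup_ofList t
  · intro h
    rw [PySem.Set.ofList_eq_self_of_nodup t h]

-- the lengths A keeps among take 1 .. take m are exactly 1 .. E (duplicate-freeness is prefix-closed)
theorem filt (t : List Char) : ∀ (m E : Nat), E ≤ m → m ≤ t.length →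
    (∀ L, 1 ≤ L → L ≤ m → ((t.take L).Nodup ↔ L ≤ E)) →
    ((((List.range m).map (fun q => t.take (q + 1))).filter
        (fun u => decide u.Nodup)).map (fun u => (u.length : Int)))
      = (List.range E).map (fun (q : Nat) => ((q : Int) + 1)) := by
  intro m
  induction m with
  | zero =>
      intro E hE _ _
      have : E = 0 := by omega
      subst this
      simp
  | succ m ih =>
      intro E hE hml h
      rw [List.range_succ]
      simp only [List.map_append, List.filter_append]
      by_cases hEm : E ≤ m
      · have hlast : ¬ (t.take (m + 1)).Nodup := by
          intro hnd
          have := (h (m + 1) (by omega) le_rfl).mp hnd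
          omega
        rw [ih E hEm (by omega) (fun L h1 h2 => h L h1 (by omega))]
        simp [hlast]
      · have hEeq : E = m + 1 := by omega
        subst hEeq
        have hlast : (t.take (m + 1)).Nodup := (h (m + 1) (by omega) le_rfl).mpr le_rfl
        have hlen : (t.take (m + 1)).length = m + 1 := by
          rw [List.length_take]; omega
        have hmid : ∀ L, 1 ≤ L → L ≤ m → ((t.take L).Nodup ↔ L ≤ m) := by
          intro L h1 h2
          constructor
          · intro _; exact h2
          · intro _; exact (h L h1 (by omega)).mpr (by omega)
        rw [ih m le_rfl (by omega) hmid]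
        rw [List.range_succ, List.map_append]
        simp [hlast, hlen]

theorem blockA_eq (cs : List Char) (k : Nat) (hk : k < cs.length) :
    ((((PySem.List.pyRange ((k : Int) + 1) ((cs.length : Int) + 1) 1).map
        (fun j => PySem.List.slice cs (some (k : Int)) (some j))).filter
        (fun u => decide ((PySem.Set.ofList u).length = u.length))).map
      (fun u => (u.length : Int)))
      = (List.range (bExtent (cs.drop k) PySem.Set.empty)).map (fun (q : Nat) => ((q : Int) + 1)) := by
  have hm : (cs.drop k).length = cs.length - k := List.length_drop
  rw [PySem.List.pyRange_one, List.map_map]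
  have h1 : (((cs.length : Int) + 1) - ((k : Int) + 1)).toNat = cs.length - k := by omega
  rw [h1]
  have h2 : ((List.range (cs.length - k)).map
      ((fun j => PySem.List.slice cs (some (k : Int)) (some j)) ∘ fun (q : Nat) => (k : Int) + 1 + (q : Int)))
      = (List.range (cs.length - k)).map (fun (q : Nat) => (cs.drop k).take (q + 1)) := by
    apply List.map_congr_left
    intro q _
    simp only [Function.comp]
    have : ((k : Int) + 1 + (q : Int)) = (((k + (q + 1) : Nat)) : Int) := by push_cast; ring
    rw [this, PySem.List.slice_natCast]
    congr 1
    omega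
  rw [h2]
  have h3 : (((List.range (cs.length - k)).map (fun q => (cs.drop k).take (q + 1))).filter
        (fun u => decide ((PySem.Set.ofList u).length = u.length)))
      = (((List.range (cs.length - k)).map (fun q => (cs.drop k).take (q + 1))).filter
        (fun u => decide u.Nodup)) := by
    apply List.filter_congr
    intro u _
    exact decide_eq_decide.mpr (setLen_iff_nodup u)
  rw [h3]
  apply filt
  · rw [← hm] ; exact bExtent_le _ _
  · omega
  · intro L h1L h2L
    have := bExtent_iff (cs.drop k) PySem.Set.empty L (by omega)
    simpa [PySem.Set.empty] using this

theorem blocks_perm (cs : List Char) (I : List Int)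
    (hI : ∀ i ∈ I, 0 ≤ i ∧ i < (cs.length : Int)) :
    (((I.flatMap (fun i =>
        (PySem.List.pyRange (i + 1) ((cs.length : Int) + 1) 1).map
          (fun j => PySem.List.slice cs (some i) (some j)))).filter
        (fun u => decide ((PySem.Set.ofList u).length = u.length))).map
      (fun u => (u.length : Int))).Perm
    (I.flatMap (fun i =>
      PySem.List.pyRange ((bExtent (cs.drop i.toNat) PySem.Set.empty : Nat) : Int) 0 (-1))) := by
  induction I with
  | nil => simp
  | cons i I' ih =>
      obtain ⟨h0, hn⟩ := hI i List.mem_cons_self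
      have hk : i.toNat < cs.length := by omega
      have hi : i = ((i.toNat : Nat) : Int) := by omega
      simp only [List.flatMap_cons, List.filter_append, List.map_append]
      apply List.Perm.append
      · -- one block: A's ascending kept lengths vs B's descending range
        have hasc := blockA_eq cs i.toNat hk
        rw [hi]
        simp only [Int.toNat_natCast]
        rw [hasc]
        have hrev : PySem.List.pyRange ((bExtent (cs.drop i.toNat) PySem.Set.empty : Nat) : Int) 0 (-1)
            = (PySem.List.pyRange 1 (((bExtent (cs.drop i.toNat) PySem.Set.empty : Nat) : Int) + 1) 1).reverse := by
          rw [PySem.List.pyRange_neg_one_eq_reverse]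
          norm_num
        rw [hrev, PySem.List.pyRange_one]
        have harith : ((((bExtent (cs.drop i.toNat) PySem.Set.empty : Nat) : Int) + 1) - 1).toNat
            = bExtent (cs.drop i.toNat) PySem.Set.empty := by omega
        rw [harith]
        have : (List.range (bExtent (cs.drop i.toNat) PySem.Set.empty)).map (fun (q : Nat) => ((q : Int) + 1))
            = (List.range (bExtent (cs.drop i.toNat) PySem.Set.empty)).map (fun (q : Nat) => (1 : Int) + (q : Int)) := by
          apply List.map_congr_left; intro q _; ring
        rw [this]
        exact (List.reverse_perm _).symm
      · exact ih (fun j hj => hI j (List.mem_cons_of_mem _ hj))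

theorem main_eq (s : String) :
    threeLongestSubstrBruteForce s = threeLongestSubstrBruteForce_alt s := by
  unfold threeLongestSubstrBruteForce threeLongestSubstrBruteForce_alt
  simp only [PySem.List.foldl_append_ite
      (p := fun t : List Char => (PySem.Set.ofList t).length = t.length)
      (f := fun t : List Char => (t.length : Int)),
    PySem.List.foldl_append_eq_flatMap, List.nil_append,
    PySem.List.slice_zero_start]
  rw [PySem.List.slice_to _ (by norm_num : (0:Int) ≤ 3), PySem.List.slice_to _ (by norm_num : (0:Int) ≤ 3)]
  have hperm := blocks_perm s.toList (PySem.List.pyRange 0 (s.toList.length : Int) 1)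
    (fun i hi => by
      have := (PySem.List.mem_pyRange_one).mp hi
      exact ⟨this.1, this.2⟩)
  congr 1
  apply List.Perm.eq_of_pairwise (le := fun a b : Int => b ≤ a)
  · intro a b _ _ h1 h2; exact le_antisymm h2 h1
  · exact List.pairwise_reverse.mpr (by simpa using PySem.List.sorted_pairwise _ (fun x : Int => x))
  · simpa using PySem.List.sorted_pairwise_rev _ (fun x : Int => x)
  · exact ((List.reverse_perm _).trans (PySem.List.sorted_perm _ _ _)).trans
      (hperm.trans (PySem.List.sorted_perm _ _ _).symm)

-- ===== VERDICT (by name: the statement is the Claim_ definition above) =====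
theorem threeLongestSubstrBruteForce_spec : Claim_equal_threeLongestSubstrBruteForce := by
  intro s _hd
  exact main_eq s
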